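-- pv_equiv track=rewrite | github.com/muhammadfarhanu12-ship-it/Sentinel-core | backend-ai/app/services/threat_detection.py | _primary_threat_type
-- ===== SOURCE A (Python) =====
-- THREAT_PROMPT_INJECTION = "PROMPT_INJECTION"
--
-- THREAT_DATA_EXFILTRATION = "DATA_EXFILTRATION"
--
-- THREAT_POLICY_BYPASS = "POLICY_BYPASS"
--
-- THREAT_ENCODING_OBFUSCATION = "ENCODING_OBFUSCATION"
--
-- THREAT_PRIVILEGE_ESCALATION = "PRIVILEGE_ESCALATION"
--
-- THREAT_MALICIOUS_CODE = "MALICIOUS_CODE"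
--
-- THREAT_DATA_LEAK = "DATA_LEAK"
--
-- def _primary_threat_type(threat_types: list[str]) -> str:
--     # Stable priority order for backwards compatibility in UI/analytics that expect a single label.
--     priority = [
--         THREAT_PROMPT_INJECTION,
--         THREAT_DATA_EXFILTRATION,
--         THREAT_POLICY_BYPASS,
--         THREAT_PRIVILEGE_ESCALATION,
--         THREAT_ENCODING_OBFUSCATION,
--         THREAT_MALICIOUS_CODE,
--         THREAT_DATA_LEAK,
--     ]
--     upper = [t.upper() for t in threat_types if t]
--     for t in priority:
--         if t in upper:
--             return t
--     return (upper[0] if upper else "NONE")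
-- ===== SOURCE B (Python) =====
-- THREAT_PROMPT_INJECTION = "PROMPT_INJECTION"
-- THREAT_DATA_EXFILTRATION = "DATA_EXFILTRATION"
-- THREAT_POLICY_BYPASS = "POLICY_BYPASS"
-- THREAT_ENCODING_OBFUSCATION = "ENCODING_OBFUSCATION"
-- THREAT_PRIVILEGE_ESCALATION = "PRIVILEGE_ESCALATION"
-- THREAT_MALICIOUS_CODE = "MALICIOUS_CODE"
-- THREAT_DATA_LEAK = "DATA_LEAK"
--
--
-- def _primary_threat_type(threat_types: list[str]) -> str:
--     priority = [
--         THREAT_PROMPT_INJECTION,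
--         THREAT_DATA_EXFILTRATION,
--         THREAT_POLICY_BYPASS,
--         THREAT_PRIVILEGE_ESCALATION,
--         THREAT_ENCODING_OBFUSCATION,
--         THREAT_MALICIOUS_CODE,
--         THREAT_DATA_LEAK,
--     ]
--     rank = {p: i for i, p in enumerate(priority)}
--     upper = [t.upper() for t in threat_types if t]
--     if not upper:
--         return "NONE"
--     best = upper[0]
--     best_rank = rank.get(best, len(priority))
--     for t in upper[1:]:
--         k = rank.get(t, len(priority))
--         if k < best_rank:
--             best, best_rank = t, k
--     return best
-- ===== Notes on version B (the rewrite author's own statement) =====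
-- stated objective: alternative
-- what changed: Replaces A's seven membership scans over the uppercased list (one per priority label) with a rank dictionary built once and a single accumulator pass over the input selecting the first element of minimal rank, with first-element fallback falling out of the rank default.
import Mathlib
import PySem

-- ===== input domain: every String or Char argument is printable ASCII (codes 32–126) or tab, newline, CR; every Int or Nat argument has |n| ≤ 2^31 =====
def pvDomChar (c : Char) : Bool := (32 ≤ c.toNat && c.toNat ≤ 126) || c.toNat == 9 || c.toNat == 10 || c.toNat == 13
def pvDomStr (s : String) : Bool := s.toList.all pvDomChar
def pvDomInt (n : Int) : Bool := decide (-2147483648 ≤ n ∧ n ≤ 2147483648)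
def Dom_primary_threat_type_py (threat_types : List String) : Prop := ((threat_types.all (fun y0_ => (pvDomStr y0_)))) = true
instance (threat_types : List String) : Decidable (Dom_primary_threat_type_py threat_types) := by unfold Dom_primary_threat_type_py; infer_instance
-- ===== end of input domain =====

-- B replaces A's per-label membership scans with one rank-dictionary pass over the input (alternative decomposition, same behaviour).

-- ===== PORT A =====
def pvPriority : List String :=
  ["PROMPT_INJECTION", "DATA_EXFILTRATION", "POLICY_BYPASS", "PRIVILEGE_ESCALATION",
   "ENCODING_OBFUSCATION", "MALICIOUS_CODE", "DATA_LEAK"]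

-- `for t in priority: if t in upper: return t`
def pvALoop : List String → List String → Option String
  | [], _ => none
  | t :: rest, upper => if t ∈ upper then some t else pvALoop rest upper

def primary_threat_type_py (threat_types : List String) : String :=
  let upper := (threat_types.filter (fun t => t ≠ "")).map PySem.Str.upper
  match pvALoop pvPriority upper with
  | some t => t
  | none => match upper with
            | [] => "NONE"
            | h :: _ => h

-- ===== PORT B =====
-- rank = {p: i for i, p in enumerate(priority)}
def pvRank : PySem.Dict String Int :=
  (PySem.List.enumerate pvPriority 0).foldl (fun d p => d.insert p.2 p.1) PySem.Dict.empty

def primary_threat_type_py_alt (threat_types : List String) : String :=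
  let upper := (threat_types.filter (fun t => t ≠ "")).map PySem.Str.upper
  match upper with
  | [] => "NONE"
  | h :: rest =>
      (rest.foldl (fun acc t =>
          let k := pvRank.getD t 7
          if k < acc.2 then (t, k) else acc)
        (h, pvRank.getD h 7)).1

-- ===== PRECONDITION & SPEC =====
def Spec_primary_threat_type_py (threat_types : List String) (out : String) : Prop := out = primary_threat_type_py_alt threat_types
instance (threat_types : List String) (out : String) : Decidable (Spec_primary_threat_type_py threat_types out) := by unfold Spec_primary_threat_type_py; infer_instance

-- ===== CLAIM (what is proved, stated in full; the proofs are below) =====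
def Claim_equal_primary_threat_type_py : Prop := ∀ (threat_types : List String), Dom_primary_threat_type_py threat_types → Spec_primary_threat_type_py threat_types (primary_threat_type_py threat_types)

-- ===== LEMMAS AND PROOFS =====

-- closed form of pvRank.getD · 7
def pvR (s : String) : Int :=
  if s = "PROMPT_INJECTION" then 0
  else if s = "DATA_EXFILTRATION" then 1
  else if s = "POLICY_BYPASS" then 2
  else if s = "PRIVILEGE_ESCALATION" then 3
  else if s = "ENCODING_OBFUSCATION" then 4
  else if s = "MALICIOUS_CODE" then 5
  else if s = "DATA_LEAK" then 6
  else 7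

theorem pvRank_getD (s : String) : pvRank.getD s 7 = pvR s := by
  have h : pvRank = PySem.Dict.mk
      [("PROMPT_INJECTION", 0), ("DATA_EXFILTRATION", 1), ("POLICY_BYPASS", 2),
       ("PRIVILEGE_ESCALATION", 3), ("ENCODING_OBFUSCATION", 4), ("MALICIOUS_CODE", 5),
       ("DATA_LEAK", 6)] := by decide
  rw [h]
  simp only [PySem.Dict.getD_eq_get?_getD, PySem.Dict.get?_mk_cons, pvR]
  split_ifs <;> simp_all [PySem.Dict.get?]

theorem pvR_range (s : String) : 0 ≤ pvR s ∧ pvR s ≤ 7 := by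
  unfold pvR; split_ifs <;> omega

theorem pvR_cases (s : String) :
    (s = "PROMPT_INJECTION" ∧ pvR s = 0) ∨ (s = "DATA_EXFILTRATION" ∧ pvR s = 1) ∨
    (s = "POLICY_BYPASS" ∧ pvR s = 2) ∨ (s = "PRIVILEGE_ESCALATION" ∧ pvR s = 3) ∨
    (s = "ENCODING_OBFUSCATION" ∧ pvR s = 4) ∨ (s = "MALICIOUS_CODE" ∧ pvR s = 5) ∨
    (s = "DATA_LEAK" ∧ pvR s = 6) ∨ pvR s = 7 := by
  unfold pvR; split_ifs <;> simp_all

def pvFold (u : List String) (acc : String × Int) : String × Int :=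
  u.foldl (fun acc t => let k := pvR t; if k < acc.2 then (t, k) else acc) acc

theorem pvFold_inv (u : List String) (b : String) :
    (pvFold u (b, pvR b)).1 ∈ b :: u ∧
    (pvFold u (b, pvR b)).2 = pvR (pvFold u (b, pvR b)).1 ∧
    (∀ x ∈ b :: u, (pvFold u (b, pvR b)).2 ≤ pvR x) := by
  induction u generalizing b with
  | nil => simp [pvFold]
  | cons t u ih =>
    by_cases hlt : pvR t < pvR b
    · have hstep : pvFold (t :: u) (b, pvR b) = pvFold u (t, pvR t) := by
        simp [pvFold, hlt]
      obtain ⟨h1, h2, h3⟩ := ih t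
      rw [hstep]
      refine ⟨List.mem_cons_of_mem b h1, h2, ?_⟩
      intro x hx
      rcases List.mem_cons.mp hx with rfl | hx'
      · have := h3 t (by simp); omega
      · exact h3 x hx'
    · have hstep : pvFold (t :: u) (b, pvR b) = pvFold u (b, pvR b) := by
        simp [pvFold, hlt]
      obtain ⟨h1, h2, h3⟩ := ih b
      rw [hstep]
      refine ⟨?_, h2, ?_⟩
      · rcases List.mem_cons.mp h1 with hb | hx'
        · simp [hb]
        · simp [hx']
      · intro x hx
        rcases List.mem_cons.mp hx with rfl | hx'
        · exact h3 x (by simp)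
        · rcases List.mem_cons.mp hx' with rfl | hx''
          · have := h3 b (by simp); omega
          · exact h3 x (by simp [hx''])

theorem pvFold_stay (u : List String) (b : String) (k : Int)
    (h : ∀ x ∈ u, ¬ pvR x < k) : pvFold u (b, k) = (b, k) := by
  induction u with
  | nil => rfl
  | cons t u ih =>
    have ht := h t (by simp)
    simp only [pvFold, List.foldl_cons]
    simp only [if_neg ht]
    exact ih (fun x hx => h x (by simp [hx]))

theorem pvALoop_eq (u : List String) (c : String) (hc : c ∈ u)
    (hmin : ∀ x ∈ u, pvR c ≤ pvR x) :
    pvALoop pvPriority u = if pvR c < 7 then some c else none := by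
  have key : ∀ L : String, pvR L < pvR c → L ∉ u := by
    intro L hL hmem
    have := hmin L hmem; omega
  rcases pvR_cases c with ⟨rfl, hj⟩ | ⟨rfl, hj⟩ | ⟨rfl, hj⟩ | ⟨rfl, hj⟩ | ⟨rfl, hj⟩ | ⟨rfl, hj⟩ | ⟨rfl, hj⟩ | hj
  ·

    simp [pvALoop, pvPriority, hj, hc]
  ·
    have hn0 : "PROMPT_INJECTION" ∉ u := key "PROMPT_INJECTION" (by rw [hj]; decide)
    simp [pvALoop, pvPriority, hj, hc, hn0]
  ·
    have hn0 : "PROMPT_INJECTION" ∉ u := key "PROMPT_INJECTION" (by rw [hj]; decide)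
    have hn1 : "DATA_EXFILTRATION" ∉ u := key "DATA_EXFILTRATION" (by rw [hj]; decide)
    simp [pvALoop, pvPriority, hj, hc, hn0, hn1]
  ·
    have hn0 : "PROMPT_INJECTION" ∉ u := key "PROMPT_INJECTION" (by rw [hj]; decide)
    have hn1 : "DATA_EXFILTRATION" ∉ u := key "DATA_EXFILTRATION" (by rw [hj]; decide)
    have hn2 : "POLICY_BYPASS" ∉ u := key "POLICY_BYPASS" (by rw [hj]; decide)
    simp [pvALoop, pvPriority, hj, hc, hn0, hn1, hn2]
  ·
    have hn0 : "PROMPT_INJECTION" ∉ u := key "PROMPT_INJECTION" (by rw [hj]; decide)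
    have hn1 : "DATA_EXFILTRATION" ∉ u := key "DATA_EXFILTRATION" (by rw [hj]; decide)
    have hn2 : "POLICY_BYPASS" ∉ u := key "POLICY_BYPASS" (by rw [hj]; decide)
    have hn3 : "PRIVILEGE_ESCALATION" ∉ u := key "PRIVILEGE_ESCALATION" (by rw [hj]; decide)
    simp [pvALoop, pvPriority, hj, hc, hn0, hn1, hn2, hn3]
  ·
    have hn0 : "PROMPT_INJECTION" ∉ u := key "PROMPT_INJECTION" (by rw [hj]; decide)
    have hn1 : "DATA_EXFILTRATION" ∉ u := key "DATA_EXFILTRATION" (by rw [hj]; decide)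
    have hn2 : "POLICY_BYPASS" ∉ u := key "POLICY_BYPASS" (by rw [hj]; decide)
    have hn3 : "PRIVILEGE_ESCALATION" ∉ u := key "PRIVILEGE_ESCALATION" (by rw [hj]; decide)
    have hn4 : "ENCODING_OBFUSCATION" ∉ u := key "ENCODING_OBFUSCATION" (by rw [hj]; decide)
    simp [pvALoop, pvPriority, hj, hc, hn0, hn1, hn2, hn3, hn4]
  ·
    have hn0 : "PROMPT_INJECTION" ∉ u := key "PROMPT_INJECTION" (by rw [hj]; decide)
    have hn1 : "DATA_EXFILTRATION" ∉ u := key "DATA_EXFILTRATION" (by rw [hj]; decide)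
    have hn2 : "POLICY_BYPASS" ∉ u := key "POLICY_BYPASS" (by rw [hj]; decide)
    have hn3 : "PRIVILEGE_ESCALATION" ∉ u := key "PRIVILEGE_ESCALATION" (by rw [hj]; decide)
    have hn4 : "ENCODING_OBFUSCATION" ∉ u := key "ENCODING_OBFUSCATION" (by rw [hj]; decide)
    have hn5 : "MALICIOUS_CODE" ∉ u := key "MALICIOUS_CODE" (by rw [hj]; decide)
    simp [pvALoop, pvPriority, hj, hc, hn0, hn1, hn2, hn3, hn4, hn5]
  ·
    have hn0 : "PROMPT_INJECTION" ∉ u := key "PROMPT_INJECTION" (by rw [hj]; decide)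
    have hn1 : "DATA_EXFILTRATION" ∉ u := key "DATA_EXFILTRATION" (by rw [hj]; decide)
    have hn2 : "POLICY_BYPASS" ∉ u := key "POLICY_BYPASS" (by rw [hj]; decide)
    have hn3 : "PRIVILEGE_ESCALATION" ∉ u := key "PRIVILEGE_ESCALATION" (by rw [hj]; decide)
    have hn4 : "ENCODING_OBFUSCATION" ∉ u := key "ENCODING_OBFUSCATION" (by rw [hj]; decide)
    have hn5 : "MALICIOUS_CODE" ∉ u := key "MALICIOUS_CODE" (by rw [hj]; decide)
    have hn6 : "DATA_LEAK" ∉ u := key "DATA_LEAK" (by rw [hj]; decide)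
    simp [pvALoop, pvPriority, hj, hn0, hn1, hn2, hn3, hn4, hn5, hn6]

theorem pv_core (u : List String) :
    (match pvALoop pvPriority u with
     | some t => t
     | none => match u with | [] => "NONE" | h :: _ => h)
    = (match u with
       | [] => "NONE"
       | h :: rest => (pvFold rest (h, pvR h)).1) := by
  cases u with
  | nil => decide
  | cons h rest =>
    obtain ⟨h1, h2, h3⟩ := pvFold_inv rest h
    have hmin : ∀ x ∈ h :: rest, pvR (pvFold rest (h, pvR h)).1 ≤ pvR x := by
      intro x hx; have := h3 x hx; omega
    rw [pvALoop_eq (h :: rest) _ h1 hmin]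
    by_cases hf : pvR (pvFold rest (h, pvR h)).1 < 7
    · simp [hf]
    · have h7 : pvR (pvFold rest (h, pvR h)).1 = 7 := by
        have := (pvR_range (pvFold rest (h, pvR h)).1).2; omega
      have hall : ∀ x ∈ rest, ¬ pvR x < pvR h := by
        intro x hx
        have hxge : (7:Int) ≤ pvR x := h7 ▸ h2 ▸ h3 x (List.mem_cons_of_mem h hx)
        have := (pvR_range x).2
        have hh := (pvR_range h).2
        omega
      have heq := pvFold_stay rest h (pvR h) hall
      have hh7 : pvR h = 7 := by rw [heq] at h7; exact h7
      rw [hh7] at heq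
      simp [hh7, heq]

-- ===== VERDICT (by name: the statement is the Claim_ definition above) =====
theorem primary_threat_type_py_spec : Claim_equal_primary_threat_type_py := by
  intro threat_types _
  unfold Spec_primary_threat_type_py primary_threat_type_py primary_threat_type_py_alt
  simp only [pvRank_getD]
  exact pv_core ((threat_types.filter (fun t => t ≠ "")).map PySem.Str.upper)
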